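-- pv_equiv track=rewrite | github.com/ehrakis/Advent-of-code | 2024/day_7/part_1.py | set_next_signs
-- ===== SOURCE A (Python) =====
-- def set_next_signs(signs):
--     for i in range(len(signs) - 1, -1, -1):
--         if signs[i] == "+":
--             signs[i] = "*"
--             return True
--         else:
--             signs[i] = "+"
--     return False
-- ===== SOURCE B (Python) =====
-- def set_next_signs(signs):
--     # Arithmetic view: the list is a binary counter ('+' = 0, anything else = 1,
--     # most significant first).  Encode it as an integer, add 1 modulo 2**len,
--     # decode back; report whether the increment overflowed.
--     n = sum(1 << i for i, s in enumerate(reversed(signs)) if s != "+")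
--     m = (n + 1) % (1 << len(signs))
--     signs[:] = ["*" if (m >> i) & 1 else "+" for i in range(len(signs) - 1, -1, -1)]
--     return n + 1 < (1 << len(signs))
-- ===== Notes on version B (the rewrite author's own statement) =====
-- stated objective: alternative
-- what changed: Replaces A's backward scan-and-flip loop by an arithmetic encode/increment/decode: the list is read as a binary number ('+'=0, other=1), incremented modulo 2**len, written back, and the return value is the no-overflow test n+1 < 2**len; equivalence is about the return value only (B's in-place rewrite coincides with A's on '+'/'*' lists but normalises other strings to '*').
import Mathlib
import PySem

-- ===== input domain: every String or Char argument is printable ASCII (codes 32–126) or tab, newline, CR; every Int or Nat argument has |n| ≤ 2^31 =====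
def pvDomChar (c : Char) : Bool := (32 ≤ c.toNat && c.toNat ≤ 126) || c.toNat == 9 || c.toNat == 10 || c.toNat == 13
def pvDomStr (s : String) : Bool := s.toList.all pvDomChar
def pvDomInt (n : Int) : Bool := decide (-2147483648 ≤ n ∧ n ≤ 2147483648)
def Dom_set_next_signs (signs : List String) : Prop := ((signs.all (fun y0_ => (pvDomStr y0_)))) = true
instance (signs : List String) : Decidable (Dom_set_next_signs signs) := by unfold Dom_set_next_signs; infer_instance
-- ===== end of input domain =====

-- B replaces A's backward scan-and-flip loop by an arithmetic encode/increment/decode of the list read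
-- as a binary counter; equivalence proved here is about the RETURN value only (both Pythons also mutate
-- `signs`; B's rewrite coincides with A's on '+'/'*' entries but normalises other strings to '*').

-- ===== PORT A =====
-- loop body of 'for i in range(len(signs)-1, -1, -1)', carrying the mutated list
def setNextGo (signs : List String) : List Int → Bool
  | [] => false
  | i :: rest =>
    match PySem.List.pyGet? signs i with
    | none => false           -- unreachable: i is always in range during the loop
    | some s =>
      if s == "+" then true
      else setNextGo (signs.set i.toNat "+") rest   -- signs[i] = "+" (i ≥ 0 in this loop)

def set_next_signs (signs : List String) : Bool :=
  setNextGo signs (PySem.List.pyRange ((signs.length : Int) - 1) (-1) (-1))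

-- ===== PORT B =====
-- n = sum(1 << i for i, s in enumerate(reversed(signs)) if s != "+"); the decode-and-write-back
-- (signs[:] = …) does not affect the return value and is dropped in this port.
def set_next_signs_alt (signs : List String) : Bool :=
  let n := (PySem.List.enumerate signs.reverse).foldl
    (fun acc p => if p.2 ≠ "+" then acc + 2 ^ p.1.toNat else acc) 0
  decide (n + 1 < 2 ^ signs.length)

-- ===== PRECONDITION & SPEC =====
def Spec_set_next_signs (signs : List String) (out : Bool) : Prop := out = set_next_signs_alt signs
instance (signs : List String) (out : Bool) : Decidable (Spec_set_next_signs signs out) := by unfold Spec_set_next_signs; infer_instance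

-- ===== CLAIM (what is proved, stated in full; the proofs are below) =====
def Claim_equal_set_next_signs : Prop := ∀ (signs : List String), Dom_set_next_signs signs → Spec_set_next_signs signs (set_next_signs signs)

-- ===== LEMMAS AND PROOFS =====

-- recursive binary value of a sign list, least-significant digit first
def signVal : List String → Nat
  | [] => 0
  | a :: t => (if a = "+" then 0 else 1) + 2 * signVal t

lemma foldl_enumerate_signVal : ∀ (l : List String) (s : Int) (acc : Nat), 0 ≤ s →
    (PySem.List.enumerate l s).foldl
      (fun acc p => if p.2 ≠ "+" then acc + 2 ^ p.1.toNat else acc) acc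
      = acc + 2 ^ s.toNat * signVal l := by
  intro l
  induction l with
  | nil => intro s acc _; simp [PySem.List.enumerate_nil, signVal]
  | cons a t ih =>
    intro s acc hs
    rw [PySem.List.enumerate_cons]
    simp only [List.foldl_cons]
    rw [ih (s + 1) _ (by omega)]
    have h1 : (s + 1).toNat = s.toNat + 1 := by omega
    by_cases ha : a = "+" <;> simp [ha, signVal, h1, pow_succ] <;> ring

lemma signVal_lt : ∀ (l : List String), signVal l < 2 ^ l.length := by
  intro l
  induction l with
  | nil => simp [signVal]
  | cons a t ih =>
    simp only [signVal, List.length_cons, pow_succ]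
    split_ifs <;> omega

lemma signVal_max_iff : ∀ (l : List String), (signVal l + 1 = 2 ^ l.length ↔ "+" ∉ l) := by
  intro l
  induction l with
  | nil => simp [signVal]
  | cons a t ih =>
    have ht := signVal_lt t
    simp only [signVal, List.length_cons, pow_succ, List.mem_cons, not_or]
    by_cases ha : a = "+"
    · simp [ha]; omega
    · rw [if_neg ha]
      have h1 : signVal t + 1 = 2 ^ t.length ↔ "+" ∉ t := ih
      constructor
      · intro h
        refine ⟨fun h' => ha h'.symm, h1.mp (by omega)⟩
      · intro ⟨_, h2⟩
        have := h1.mpr h2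
        omega

-- A's loop from index k-1 down to 0 returns true iff "+" occurs among the first k elements
lemma setNextGo_spec : ∀ (k : Nat) (signs : List String), k ≤ signs.length →
    setNextGo signs (PySem.List.pyRange ((k : Int) - 1) (-1) (-1)) = decide ("+" ∈ signs.take k) := by
  intro k
  induction k with
  | zero =>
    intro signs _
    rw [PySem.List.pyRange_neg_one_eq_nil (by norm_num)]
    simp [setNextGo]
  | succ k ih =>
    intro signs hk
    have hlt : k < signs.length := hk
    rw [show ((k + 1 : Nat) : Int) - 1 = (k : Int) by push_cast; ring,
        PySem.List.pyRange_neg_one_cons (by omega)]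
    have hget : PySem.List.pyGet? signs (k : Int) = some signs[k] := by
      simp [PySem.List.pyGet?, PySem.List.pyIdx?, hlt]
    simp only [setNextGo, hget]
    have htake : signs.take (k + 1) = signs.take k ++ [signs[k]] := by
      rw [List.take_add_one, List.getElem?_eq_getElem hlt]
      rfl
    by_cases hp : signs[k] = "+"
    · simp [hp, htake]
    · have hbeq : (signs[k] == "+") = false := by simp [hp]
      rw [hbeq, if_neg (by simp)]
      rw [show ((k : Int)).toNat = k by simp]
      rw [ih (signs.set k "+") (by simp; omega)]
      have hsetk : (signs.set k "+").take k = signs.take k := by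
        apply List.ext_getElem
        · simp
        · intro i h1 h2
          simp only [List.getElem_take]
          rw [List.getElem_set_ne (by simp at h1; omega)]
      rw [hsetk]
      have hne : "+" ≠ signs[k] := fun h => hp h.symm
      simp only [decide_eq_decide]
      rw [htake]
      constructor
      · exact fun h => List.mem_append_left _ h
      · intro h
        rcases List.mem_append.mp h with h' | h'
        · exact h'
        · exact absurd (List.mem_singleton.mp h') hne

-- ===== VERDICT (by name: the statement is the Claim_ definition above) =====
theorem set_next_signs_spec : Claim_equal_set_next_signs := by
  intro signs _
  unfold Spec_set_next_signs set_next_signs set_next_signs_alt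
  rw [setNextGo_spec signs.length signs (le_refl _)]
  simp only [List.take_length]
  rw [foldl_enumerate_signVal signs.reverse 0 0 (le_refl _)]
  have hlen : signs.reverse.length = signs.length := List.length_reverse
  have hlt := signVal_lt signs.reverse
  have hmax := signVal_max_iff signs.reverse
  rw [hlen] at hlt hmax
  simp only [Int.toNat_zero, pow_zero, one_mul, zero_add]
  by_cases h : "+" ∈ signs
  · have : "+" ∈ signs.reverse := by simpa using h
    have hne : signVal signs.reverse + 1 ≠ 2 ^ signs.length := fun he => (hmax.mp he) this
    simp [h]
    omega
  · have : "+" ∉ signs.reverse := by simpa using h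
    have heq := hmax.mpr this
    simp [h]
    omega
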